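-- pv_equiv track=rewrite | github.com/Trp12xx/presentation-docker-mirage | create_diagrams.py | extractDiagramAndImageName
-- ===== SOURCE A (Python) =====
-- def extractDiagramAndImageName(iterator):
--     match = []
--     matching = False
--     for line in iterator:
--         if not line.strip():
--             continue
--         if matching:
--             if line.startswith(".. image::"):
--                 matching = False
--                 image = line[11:-1]
--                 yield ("".join(match), image)
--                 match = []
--             else:
--                 match.append(line)
--         if line == "..\n":
--                 matching = True
-- ===== SOURCE B (Python) =====
-- def extractDiagramAndImageName(iterator):
--     lines = [l for l in iterator if l.strip()]
--     start = 0
--     for i, line in enumerate(lines):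
--         if line.startswith(".. image::"):
--             seg = lines[start:i]
--             if "..\n" in seg:
--                 j = seg.index("..\n")
--                 yield ("".join(seg[j + 1:]), line[11:-1])
--             start = i + 1
-- ===== Notes on version B (the rewrite author's own statement) =====
-- stated objective: alternative
-- what changed: Replaces A's streaming state machine (matching flag + incremental block accumulator) by two staged passes: first materialize the non-blank lines, then split that list at '.. image::' delimiter lines by index arithmetic, recovering each block as the slice after the first '..' marker found with list.index.
import Mathlib
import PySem

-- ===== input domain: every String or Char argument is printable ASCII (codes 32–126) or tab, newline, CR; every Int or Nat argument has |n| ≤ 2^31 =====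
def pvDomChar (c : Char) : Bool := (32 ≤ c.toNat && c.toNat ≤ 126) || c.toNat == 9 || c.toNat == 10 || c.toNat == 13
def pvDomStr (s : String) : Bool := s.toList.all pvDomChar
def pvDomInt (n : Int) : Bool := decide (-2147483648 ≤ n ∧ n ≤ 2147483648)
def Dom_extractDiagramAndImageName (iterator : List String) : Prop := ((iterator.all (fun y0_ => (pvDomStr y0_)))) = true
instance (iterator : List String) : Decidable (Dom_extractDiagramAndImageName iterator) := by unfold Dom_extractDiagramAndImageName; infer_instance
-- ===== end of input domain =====

-- B replaces A's streaming flag-and-accumulator state machine by staged passes: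
-- filter the blank lines away, then split at '.. image::' lines by index arithmetic,
-- recovering each block as the slice after the first '..' marker (alternative, same cost).

-- ===== PORT A =====
-- A's loop body, step for step: skip blanks; if matching, either yield on an
-- image line or append; finally re-check 'line == "..\n"' to (re)set the flag.
def pvStepA : List (String × String) × List String × Bool → String →
    List (String × String) × List String × Bool
  | (out, mtch, matching), line =>
    if PySem.Str.strip line = "" then (out, mtch, matching)
    else
      let (out, mtch, matching) :=
        if matching then
          if PySem.Str.startswith line ".. image::" then
            (out ++ [(PySem.Str.join "" mtch, PySem.Str.slice line (some 11) (some (-1)))], ([] : List String), false)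
          else (out, mtch ++ [line], matching)
        else (out, mtch, matching)
      if line = "..\n" then (out, mtch, true) else (out, mtch, matching)

def extractDiagramAndImageName (iterator : List String) : List (String × String) :=
  (iterator.foldl pvStepA ([], [], false)).1

-- ===== PORT B =====
-- B's per-line step over the enumerated non-blank lines: on a '.. image::' line,
-- slice the segment lines[start:i], look up the first "..\n" marker in it, yield
-- the joined tail after the marker, and move start past the image line.
def pvStepB (lines : List String) : List (String × String) × Int → Int × String →
    List (String × String) × Int
  | (out, start), (i, line) =>
    if PySem.Str.startswith line ".. image::" then
      let seg := PySem.List.slice lines (some start) (some i)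
      let out :=
        if "..\n" ∈ seg then
          match PySem.List.index? seg "..\n" with
          | some j => out ++ [(PySem.Str.join "" (PySem.List.slice seg (some ((j : Int) + 1)) none),
                               PySem.Str.slice line (some 11) (some (-1)))]
          | none => out
        else out
      (out, i + 1)
    else (out, start)

def extractDiagramAndImageName_alt (iterator : List String) : List (String × String) :=
  let lines := iterator.filter (fun l => !(PySem.Str.strip l == ""))
  ((PySem.List.enumerate lines 0).foldl (pvStepB lines) ([], 0)).1

-- ===== PRECONDITION & SPEC =====
def Spec_extractDiagramAndImageName (iterator : List String) (out : List (String × String)) : Prop := out = extractDiagramAndImageName_alt iterator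
instance (iterator : List String) (out : List (String × String)) : Decidable (Spec_extractDiagramAndImageName iterator out) := by unfold Spec_extractDiagramAndImageName; infer_instance

-- ===== CLAIM (what is proved, stated in full; the proofs are below) =====
def Claim_equal_extractDiagramAndImageName : Prop := ∀ (iterator : List String), Dom_extractDiagramAndImageName iterator → Spec_extractDiagramAndImageName iterator (extractDiagramAndImageName iterator)

-- ===== LEMMAS AND PROOFS =====
-- Common characterization: pvH pend xs walks the remaining lines carrying the
-- pending segment (all non-blank lines since the last image line); on an image
-- line it yields the joined tail of the segment after its first "..\n" marker.
def pvH : List String → List String → List (String × String)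
  | _, [] => []
  | pend, line :: rest =>
    if PySem.Str.strip line = "" then pvH pend rest
    else if PySem.Str.startswith line ".. image::" then
      (match PySem.List.index? pend "..\n" with
       | some j => [(PySem.Str.join "" (pend.drop (j + 1)), PySem.Str.slice line (some 11) (some (-1)))]
       | none => []) ++ pvH [] rest
    else pvH (pend ++ [line]) rest

-- A's flag-driven fold computes pvH: with matching=false (mtch is then []) it is
-- pvH on any marker-free pending list; with matching=true and block b it is pvH on
-- pend ++ "..\n" :: b (the first marker locates the start of the block).
lemma pvAH : ∀ (xs : List String) (out : List (String × String)),
    (∀ p : List String, "..\n" ∉ p → (xs.foldl pvStepA (out, [], false)).1 = out ++ pvH p xs) ∧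
    (∀ p b : List String, "..\n" ∉ p → (xs.foldl pvStepA (out, b, true)).1 = out ++ pvH (p ++ "..\n" :: b) xs) := by
  intro xs
  induction xs with
  | nil => intro out; simp [pvH]
  | cons line rest ih =>
    intro out
    by_cases hb : PySem.Str.strip line = ""
    · refine ⟨fun p hp => ?_, fun p b hp => ?_⟩
      · simp [pvStepA, hb, pvH]
        exact (ih out).1 p hp
      · simp [pvStepA, hb, pvH]
        exact (ih out).2 p b hp
    · by_cases himg : PySem.Chars.startswith line.toList ['.', '.', ' ', 'i', 'm', 'a', 'g', 'e', ':', ':'] = true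
      · have hne : line ≠ "..\n" := by
          intro h; subst h; exact absurd himg (by decide)
        refine ⟨fun p hp => ?_, fun p b hp => ?_⟩
        · have hidx : List.idxOf? "..\n" p = none := by
            rw [← PySem.List.index?_eq_idxOf?]
            exact (PySem.List.index?_eq_none_iff p "..\n").mpr hp
          simp [pvStepA, pvH, hb, himg, hne, hidx]
          exact (ih out).1 [] (by simp)
        · have hidx : List.idxOf? "..\n" (p ++ "..\n" :: b) = some p.length := by
            rw [← PySem.List.index?_eq_idxOf?]
            exact (PySem.List.index?_eq_some_iff _ _ _).mpr ⟨p, b, rfl, rfl, hp⟩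
          have hdrop : (p ++ "..\n" :: b).drop (p.length + 1) = b := by
            rw [← List.drop_drop, List.drop_left]; rfl
          simp [pvStepA, pvH, hb, himg, hne, hidx, hdrop]
          simpa using (ih (out ++ [(PySem.Str.join "" b, PySem.Str.slice line (some 11) (some (-1)))])).1 [] (by simp)
      · by_cases hm : line = "..\n"
        · subst hm
          refine ⟨fun p hp => ?_, fun p b hp => ?_⟩
          · have := (ih out).2 p [] hp
            simp [pvStepA, pvH, hb] at this ⊢
            simpa using this
          · have := (ih out).2 p (b ++ ["..\n"]) hp
            simp [pvStepA, pvH, hb] at this ⊢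
            simpa using this
        · refine ⟨fun p hp => ?_, fun p b hp => ?_⟩
          · have hp' : "..\n" ∉ p ++ [line] := by
              simp [hp]; exact fun h => hm h.symm
            simp [pvStepA, pvH, hb, himg, hm]
            exact (ih out).1 (p ++ [line]) hp'
          · have := (ih out).2 p (b ++ [line]) hp
            simp [pvStepA, pvH, hb, himg, hm] at this ⊢
            simpa using this

-- pvH ignores blank lines, so pre-filtering them away does not change it.
lemma pvH_filter : ∀ (xs p : List String),
    pvH p (xs.filter (fun l => !(PySem.Str.strip l == ""))) = pvH p xs := by
  intro xs
  induction xs with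
  | nil => intro p; simp
  | cons line rest ih =>
    intro p
    by_cases hb : PySem.Str.strip line = ""
    · simp [pvH, hb, ih]
    · by_cases himg : PySem.Chars.startswith line.toList ['.', '.', ' ', 'i', 'm', 'a', 'g', 'e', ':', ':'] = true
      · simp [pvH, hb, himg, ih]
      · simp [pvH, hb, himg, ih]

-- B's enumerated fold computes pvH on a blank-free list: at position k with
-- segment start s, the pending segment is exactly the slice lines[s:k].
lemma pvBH (lines : List String) (hnb : ∀ l ∈ lines, ¬ PySem.Str.strip l = "") :
    ∀ (n k s : Nat) (out : List (String × String)), k + n = lines.length → s ≤ k →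
      ((PySem.List.enumerate (lines.drop k) (k : Int)).foldl (pvStepB lines) (out, (s : Int))).1
        = out ++ pvH ((lines.drop s).take (k - s)) (lines.drop k) := by
  intro n
  induction n with
  | zero =>
    intro k s out hk hs
    have hnil : lines.drop k = [] := by
      apply List.drop_eq_nil_of_le; omega
    simp [hnil, pvH]
  | succ n ih =>
    intro k s out hk hs
    have hklt : k < lines.length := by omega
    have hdk : lines.drop k = lines[k] :: lines.drop (k + 1) := List.drop_eq_getElem_cons hklt
    have hnbk : ¬ PySem.Str.strip lines[k] = "" := hnb _ (List.getElem_mem hklt)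
    have hcast : ((k : Int) + 1) = (((k + 1 : Nat)) : Int) := by push_cast; ring
    rw [hdk, PySem.List.enumerate_cons, List.foldl_cons]
    by_cases himg : PySem.Chars.startswith lines[k].toList ['.', '.', ' ', 'i', 'm', 'a', 'g', 'e', ':', ':'] = true
    · have hseg : PySem.List.slice lines (some (s : Int)) (some (k : Int))
          = (lines.drop s).take (k - s) := PySem.List.slice_natCast lines s k
      have hstep : pvStepB lines (out, (s : Int)) ((k : Int), lines[k])
          = (out ++ (match List.idxOf? "..\n" ((lines.drop s).take (k - s)) with
              | some j => [(PySem.Str.join "" (((lines.drop s).take (k - s)).drop (j + 1)),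
                            PySem.Str.slice lines[k] (some 11) (some (-1)))]
              | none => []), ((k : Int) + 1)) := by
        rcases hj : PySem.List.index? ((lines.drop s).take (k - s)) "..\n" with _ | j
        · have hmem : "..\n" ∉ (lines.drop s).take (k - s) :=
            (PySem.List.index?_eq_none_iff _ _).mp hj
          have hj' : List.idxOf? "..\n" ((lines.drop s).take (k - s)) = none := by
            rw [← PySem.List.index?_eq_idxOf?]; exact hj
          simp [pvStepB, himg, hseg, hj', hmem]
        · have hmem : "..\n" ∈ (lines.drop s).take (k - s) := by
            have := PySem.List.index?_isSome_iff ((lines.drop s).take (k - s)) "..\n"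
            rw [hj] at this; simpa using this
          have hj' : List.idxOf? "..\n" ((lines.drop s).take (k - s)) = some j := by
            rw [← PySem.List.index?_eq_idxOf?]; exact hj
          have hsl : PySem.List.slice ((lines.drop s).take (k - s)) (some ((j : Int) + 1)) none
              = ((lines.drop s).take (k - s)).drop (j + 1) := by
            have hc : ((j : Int) + 1) = (((j + 1 : Nat)) : Int) := by push_cast; ring
            rw [hc, PySem.List.slice_from_natCast]
          simp [pvStepB, himg, hseg, hj', hmem, hsl]
      rw [hstep, hcast, ih (k + 1) (k + 1) _ (by omega) (le_refl _)]
      simp [pvH, hnbk, himg]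
    · have hstep : pvStepB lines (out, (s : Int)) ((k : Int), lines[k]) = (out, (s : Int)) := by
        simp [pvStepB, himg]
      rw [hstep, hcast, ih (k + 1) s out (by omega) (by omega)]
      have htake : (lines.drop s).take (k + 1 - s) = (lines.drop s).take (k - s) ++ [lines[k]] := by
        have h1 : k + 1 - s = (k - s) + 1 := by omega
        have h2 : (lines.drop s)[k - s]? = some lines[k] := by
          rw [List.getElem?_drop]
          have h3 : s + (k - s) = k := by omega
          rw [h3, List.getElem?_eq_getElem hklt]
        rw [h1, List.take_add_one, h2]
        simp
      rw [htake]
      simp [pvH, hnbk, himg]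

-- ===== VERDICT (by name: the statement is the Claim_ definition above) =====
theorem extractDiagramAndImageName_spec : Claim_equal_extractDiagramAndImageName := by
  intro iterator _
  show _ = _
  have hnb : ∀ l ∈ iterator.filter (fun l => !(PySem.Str.strip l == "")), ¬ PySem.Str.strip l = "" := by
    intro l hl
    have := List.of_mem_filter hl
    simpa using this
  have hB := pvBH (iterator.filter (fun l => !(PySem.Str.strip l == ""))) hnb
    (iterator.filter (fun l => !(PySem.Str.strip l == ""))).length 0 0 [] (by omega) (le_refl _)
  have hA := (pvAH iterator []).1 [] (by simp)
  simp only [extractDiagramAndImageName, extractDiagramAndImageName_alt]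
  rw [hA]
  simp only [Nat.cast_zero, List.drop_zero] at hB
  rw [hB, pvH_filter]
  simp
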